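-- pv_equiv track=rewrite | github.com/AjeetSinghAvdeel/security-testing-automation-framework | backend/core/engine.py | _severity_score
-- ===== SOURCE A (Python) =====
-- from typing import Any, Dict, List
--
-- def _severity_score(findings: List[Dict[str, Any]]) -> int:
--     severity_map = {
--         "Critical": 10,
--         "High": 8,
--         "Medium": 5,
--         "Low": 3,
--     }
--     return max((severity_map.get(finding.get("severity"), 1) for finding in findings), default=1)
-- ===== SOURCE B (Python) =====
-- from typing import Any, Dict, List
--
-- def _severity_score(findings: List[Dict[str, Any]]) -> int:
--     # One pass collecting the severity labels present, then a priority-ordered lookup.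
--     present = {finding.get("severity") for finding in findings}
--     if "Critical" in present:
--         return 10
--     if "High" in present:
--         return 8
--     if "Medium" in present:
--         return 5
--     if "Low" in present:
--         return 3
--     return 1
-- ===== Notes on version B (the rewrite author's own statement) =====
-- stated objective: alternative
-- what changed: Replaces the map-scores-then-max scan with building a set of the severity labels present and returning the score of the first level of the fixed priority order Critical>High>Medium>Low found in the set (1 if none).
import Mathlib
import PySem

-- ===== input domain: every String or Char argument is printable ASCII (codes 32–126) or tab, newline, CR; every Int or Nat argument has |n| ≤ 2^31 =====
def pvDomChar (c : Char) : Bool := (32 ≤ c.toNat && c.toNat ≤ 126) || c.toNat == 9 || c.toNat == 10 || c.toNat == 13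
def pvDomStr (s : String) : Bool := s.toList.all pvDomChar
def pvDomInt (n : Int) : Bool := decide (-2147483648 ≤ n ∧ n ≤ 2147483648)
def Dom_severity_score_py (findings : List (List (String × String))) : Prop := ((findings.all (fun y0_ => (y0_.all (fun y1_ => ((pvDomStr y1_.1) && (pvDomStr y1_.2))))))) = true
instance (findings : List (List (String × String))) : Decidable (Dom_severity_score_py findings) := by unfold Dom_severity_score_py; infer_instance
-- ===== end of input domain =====

-- B replaces the map-scores-then-max scan by a set of present severity labels plus a
-- priority-ordered lookup (alternative decomposition, same O(n) cost).


-- ===== PORT A =====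
-- severity_map of A
def pvSevMap : PySem.Dict String Int := PySem.Dict.mk [("Critical", 10), ("High", 8), ("Medium", 5), ("Low", 3)]

-- severity_map.get(finding.get("severity"), 1): a None key misses every string key, giving 1
def pvScoreA (f : List (String × String)) : Int :=
  match PySem.Dict.get? (PySem.Dict.mk f) "severity" with
  | some s => PySem.Dict.getD pvSevMap s 1
  | none => 1

-- max(generator, default=1)
def severity_score_py (findings : List (List (String × String))) : Int :=
  match PySem.List.max? (findings.map pvScoreA) (fun x => x) with
  | some m => m
  | none => 1

-- ===== PORT B =====
def severity_score_py_alt (findings : List (List (String × String))) : Int :=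
  let present : PySem.Set (Option String) :=
    PySem.Set.ofList (findings.map (fun f => PySem.Dict.get? (PySem.Dict.mk f) "severity"))
  if PySem.Set.contains present (some "Critical") then 10
  else if PySem.Set.contains present (some "High") then 8
  else if PySem.Set.contains present (some "Medium") then 5
  else if PySem.Set.contains present (some "Low") then 3
  else 1

-- ===== PRECONDITION & SPEC =====
def Spec_severity_score_py (findings : List (List (String × String))) (out : Int) : Prop := out = severity_score_py_alt findings
instance (findings : List (List (String × String))) (out : Int) : Decidable (Spec_severity_score_py findings out) := by unfold Spec_severity_score_py; infer_instance

-- ===== CLAIM (what is proved, stated in full; the proofs are below) =====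
def Claim_equal_severity_score_py : Prop := ∀ (findings : List (List (String × String))), Dom_severity_score_py findings → Spec_severity_score_py findings (severity_score_py findings)

-- ===== LEMMAS AND PROOFS =====

-- score of one severity label (A's per-finding value, as a function of the label)
def pvSc (o : Option String) : Int :=
  match o with
  | some s => PySem.Dict.getD pvSevMap s 1
  | none => 1

-- priority-chain value determined by which labels occur in the list
def pvChain (l : List (Option String)) : Int :=
  if (some "Critical") ∈ l then 10
  else if (some "High") ∈ l then 8
  else if (some "Medium") ∈ l then 5
  else if (some "Low") ∈ l then 3
  else 1

lemma pvSc_vals (o : Option String) :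
    pvSc o = if o = some "Critical" then 10 else if o = some "High" then 8
      else if o = some "Medium" then 5 else if o = some "Low" then 3 else 1 := by
  cases o with
  | none => simp [pvSc]
  | some s =>
    by_cases h1 : "Critical" = s <;> by_cases h2 : "High" = s <;>
      by_cases h3 : "Medium" = s <;> by_cases h4 : "Low" = s <;>
      simp_all [pvSc, pvSevMap, PySem.Dict.getD, PySem.Dict.get?,
        eq_comm (a := s)]

lemma pvSc_ge (o : Option String) : 1 ≤ pvSc o := by
  rw [pvSc_vals]; split_ifs <;> omega

lemma pvChain_ge (l : List (Option String)) : 1 ≤ pvChain l := by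
  unfold pvChain; split_ifs <;> omega

lemma pvChain_cons (o : Option String) (l : List (Option String)) :
    pvChain (o :: l) = max (pvSc o) (pvChain l) := by
  rw [pvSc_vals]
  simp only [pvChain, List.mem_cons]
  split_ifs <;> simp_all

lemma pvPull (l : List (Option String)) (x : Int) (hx : 1 ≤ x) :
    l.foldl (fun a o => max a (pvSc o)) x = max x (l.foldl (fun a o => max a (pvSc o)) 1) := by
  induction l generalizing x with
  | nil => simp; omega
  | cons o t ih =>
    rw [List.foldl_cons, List.foldl_cons, ih (max x (pvSc o)) (by omega), ih (max 1 (pvSc o)) (by have := pvSc_ge o; omega)]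
    have := pvSc_ge o
    omega

lemma pvFoldl_eq_chain (l : List (Option String)) :
    l.foldl (fun a o => max a (pvSc o)) 1 = pvChain l := by
  induction l with
  | nil => simp [pvChain]
  | cons o t ih =>
    rw [List.foldl_cons, pvPull _ _ (by have := pvSc_ge o; omega), ih, pvChain_cons]
    have h1 := pvSc_ge o
    have h2 := pvChain_ge t
    omega

lemma pvA_eq_chain (findings : List (List (String × String))) :
    severity_score_py findings = pvChain (findings.map (fun f => PySem.Dict.get? (PySem.Dict.mk f) "severity")) := by
  cases findings with
  | nil => simp [severity_score_py, PySem.List.max?, pvChain]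
  | cons f t =>
    have hmap : ∀ (u : List (List (String × String))),
        u.map pvScoreA = (u.map (fun g => PySem.Dict.get? (PySem.Dict.mk g) "severity")).map pvSc := by
      intro u; rw [List.map_map]; rfl
    rw [severity_score_py, hmap, List.map_cons, List.map_cons, PySem.List.max?_id_cons]
    rw [List.foldl_map, pvPull _ _ (pvSc_ge _), pvFoldl_eq_chain, ← pvChain_cons]

lemma pvB_eq_chain (findings : List (List (String × String))) :
    severity_score_py_alt findings = pvChain (findings.map (fun f => PySem.Dict.get? (PySem.Dict.mk f) "severity")) := by
  simp only [severity_score_py_alt, pvChain, PySem.Set.contains, List.contains_iff_mem,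
    PySem.Set.mem_ofList]

-- ===== VERDICT (by name: the statement is the Claim_ definition above) =====
theorem severity_score_py_spec : Claim_equal_severity_score_py := by
  intro findings _
  unfold Spec_severity_score_py
  rw [pvA_eq_chain, pvB_eq_chain]
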